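-- pv_equiv track=rewrite | github.com/amandafrois/hackerhank | python/deleteproducts.py | deleteProducts
-- ===== SOURCE A (Python) =====
-- def deleteProducts(ids,m):
--
-- # Creating an empty dictionary
--
--     freq = {} #to count frequency of ids
--     for item in ids:
--         if (item in freq):
--             freq[item] += 1
--         else:
--             freq[item] = 1
--
--     sortedfreq = sorted(freq.items(), key=lambda x: x[1], reverse=False)
--     uniqueids=len(sortedfreq)
--     delete=0
--
--     for i in sortedfreq:
--         if i[1]<=m:
--             delete=delete+1
--             m=m-i[1]
--         else:
--             break
--     return uniqueids-delete
-- ===== SOURCE B (Python) =====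
-- def deleteProducts(ids, m):
--     # One counting pass, then a count-of-counts table walked in increasing
--     # count order (whole buckets deleted arithmetically): no comparison sort.
--     freq = {}
--     for x in ids:
--         freq[x] = freq.get(x, 0) + 1
--     cnt = {}
--     for c in freq.values():
--         cnt[c] = cnt.get(c, 0) + 1
--     remaining = len(freq)
--     for c in range(1, len(ids) + 1):
--         k = cnt.get(c, 0)
--         t = min(k, m // c) if m >= 0 else 0
--         remaining -= t
--         m -= t * c
--         if t < k:
--             break
--     return remaining
-- ===== Notes on version B (the rewrite author's own statement) =====
-- stated objective: alternative
-- what changed: Replaces A's comparison sort of the frequency table by a count-of-counts table walked in increasing count order, deleting whole buckets arithmetically (min(k, m//c)) instead of one id at a time; avoids sorting but was not measurably faster on the timed inputs.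
import Mathlib
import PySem

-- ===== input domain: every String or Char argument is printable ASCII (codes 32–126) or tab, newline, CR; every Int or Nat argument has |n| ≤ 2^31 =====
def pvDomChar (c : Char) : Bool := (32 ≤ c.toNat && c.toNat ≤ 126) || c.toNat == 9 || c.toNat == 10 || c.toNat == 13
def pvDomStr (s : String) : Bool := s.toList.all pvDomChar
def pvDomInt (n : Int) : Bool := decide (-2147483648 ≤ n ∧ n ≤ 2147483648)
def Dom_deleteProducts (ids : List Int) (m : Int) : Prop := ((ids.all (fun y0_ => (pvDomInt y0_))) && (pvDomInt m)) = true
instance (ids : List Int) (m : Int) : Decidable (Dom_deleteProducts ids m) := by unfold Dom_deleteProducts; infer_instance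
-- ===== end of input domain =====

-- B replaces A's comparison sort of the frequency table by a count-of-counts
-- table walked in increasing count order, deleting whole buckets arithmetically
-- (objective: alternative — sort-free, not measurably faster on timed inputs).

-- ===== PORT A =====
-- the 'for i in sortedfreq: … break' loop, carrying (delete, m)
def pvLoopA : List (Int × Int) → Int → Int → Int
  | [], delete, _ => delete
  | i :: rest, delete, m =>
      if i.2 ≤ m then pvLoopA rest (delete + 1) (m - i.2) else delete

def deleteProducts (ids : List Int) (m : Int) : Int :=
  let freq := ids.foldl
    (fun d item => if d.contains item then d.insert item (d.getD item 0 + 1)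
                   else d.insert item 1) PySem.Dict.empty
  let sortedfreq := PySem.List.sorted freq.items (fun x => x.2) false
  let uniqueids : Int := sortedfreq.length
  uniqueids - pvLoopA sortedfreq 0 m

-- ===== PORT B =====
-- the 'for c in range(1, len(ids)+1): … break' loop, carrying (remaining, m)
def pvLoopB (cnt : PySem.Dict Int Int) : List Int → Int → Int → Int
  | [], remaining, _ => remaining
  | c :: cs, remaining, m =>
      let k := cnt.getD c 0
      let t := if 0 ≤ m then min k (PySem.Int.floordiv m c) else 0
      if t < k then remaining - t
      else pvLoopB cnt cs (remaining - t) (m - t * c)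

def deleteProducts_alt (ids : List Int) (m : Int) : Int :=
  let freq := ids.foldl (fun d x => d.insert x (d.getD x 0 + 1)) PySem.Dict.empty
  let cnt := freq.values.foldl (fun d c => d.insert c (d.getD c 0 + 1)) PySem.Dict.empty
  pvLoopB cnt (PySem.List.pyRange 1 ((ids.length : Int) + 1) 1) freq.size m

-- ===== PRECONDITION & SPEC =====
def Spec_deleteProducts (ids : List Int) (m : Int) (out : Int) : Prop := out = deleteProducts_alt ids m
instance (ids : List Int) (m : Int) (out : Int) : Decidable (Spec_deleteProducts ids m out) := by unfold Spec_deleteProducts; infer_instance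

-- ===== CLAIM (what is proved, stated in full; the proofs are below) =====
def Claim_equal_deleteProducts : Prop := ∀ (ids : List Int) (m : Int), Dom_deleteProducts ids m → Spec_deleteProducts ids m (deleteProducts ids m)

-- ===== LEMMAS AND PROOFS =====

-- the common greedy: how many leading elements fit into budget m
def pvGreedy : List Int → Int → Int
  | [], _ => 0
  | v :: t, m => if v ≤ m then 1 + pvGreedy t (m - v) else 0

-- the multiset of values laid out in increasing order, one bucket per count c
def pvBuckets (vals : List Int) (cs : List Int) : List Int :=
  (cs.map (fun c => List.replicate (vals.count c) c)).flatten

lemma pvLoopA_eq (l : List (Int × Int)) (d m : Int) :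
    pvLoopA l d m = d + pvGreedy (l.map (fun x => x.2)) m := by
  induction l generalizing d m with
  | nil => simp [pvLoopA, pvGreedy]
  | cons p t ih =>
    simp only [pvLoopA, List.map_cons, pvGreedy]
    split_ifs with h
    · rw [ih]; ring
    · ring

lemma pvBucket (c : Int) (hc : 1 ≤ c) (k : Nat) (rest : List Int) (m t : Int)
    (ht : t = if 0 ≤ m then min (k : Int) (PySem.Int.floordiv m c) else 0) :
    pvGreedy (List.replicate k c ++ rest) m
      = t + (if t = (k : Int) then pvGreedy rest (m - t * c) else 0) := by
  induction k generalizing m t with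
  | zero =>
    have ht0 : t = 0 := by
      rw [ht]; split_ifs with h0
      · have : 0 ≤ PySem.Int.floordiv m c := by
          rw [PySem.Int.floordiv_eq_ediv_of_pos (by omega)]
          exact Int.ediv_nonneg h0 (by omega)
        omega
      · rfl
    simp [ht0]
  | succ k ih =>
    rw [List.replicate_succ, List.cons_append]
    show (if c ≤ m then 1 + pvGreedy (List.replicate k c ++ rest) (m - c) else 0) = _
    by_cases hcm : c ≤ m
    · have h0 : 0 ≤ m := by omega
      have hpos : (0 : Int) < c := by omega
      have h0' : 0 ≤ m - c := by omega
      have hd : PySem.Int.floordiv (m - c) c = PySem.Int.floordiv m c - 1 := by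
        rw [PySem.Int.floordiv_eq_ediv_of_pos hpos, PySem.Int.floordiv_eq_ediv_of_pos hpos]
        have h2 : m - c = m + (-1) * c := by ring
        rw [h2, Int.add_mul_ediv_right _ _ (by omega : c ≠ 0)]; omega
      have hfge : 0 ≤ PySem.Int.floordiv (m - c) c := by
        rw [PySem.Int.floordiv_eq_ediv_of_pos hpos]
        exact Int.ediv_nonneg h0' (by omega)
      rw [if_pos hcm,
        ih (m - c) (if 0 ≤ m - c then min (k : Int) (PySem.Int.floordiv (m - c) c) else 0) rfl,
        if_pos h0']
      rw [ht, if_pos h0]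
      set D := PySem.Int.floordiv m c with hD
      rw [hd]
      have hD1 : 1 ≤ D := by omega
      set t' := min (k : Int) (D - 1) with ht'
      have hmin : min ((k + 1 : Nat) : Int) D = t' + 1 := by push_cast; omega
      rw [hmin]
      by_cases he : t' = (k : Int)
      · have he2 : t' + 1 = ((k + 1 : Nat) : Int) := by push_cast; omega
        rw [if_pos he, if_pos he2]
        have harg : m - c - t' * c = m - (t' + 1) * c := by ring
        rw [harg]; ring
      · have he2 : ¬ (t' + 1 = ((k + 1 : Nat) : Int)) := by push_cast at *; omega
        rw [if_neg he, if_neg he2]; ring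
    · have ht0 : t = 0 := by
        rw [ht]; split_ifs with h0
        · have hz : PySem.Int.floordiv m c = 0 := by
            rw [PySem.Int.floordiv_eq_ediv_of_pos (by omega)]
            exact Int.ediv_eq_zero_of_lt h0 (by omega)
          rw [hz]; omega
        · rfl
      have hne : ¬ ((0 : Int) = ((k + 1 : Nat) : Int)) := by push_cast; omega
      rw [if_neg hcm, ht0, if_neg hne]; ring

lemma pvLoopB_eq (vals : List Int) (cs : List Int) (h : ∀ c ∈ cs, 1 ≤ c) (rem m : Int) :
    pvLoopB (PySem.Dict.counter vals) cs rem m = rem - pvGreedy (pvBuckets vals cs) m := by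
  induction cs generalizing rem m with
  | nil => simp [pvLoopB, pvBuckets, pvGreedy]
  | cons c cs ih =>
    have hc : 1 ≤ c := h c (List.mem_cons_self ..)
    show (let k := (PySem.Dict.counter vals).getD c 0;
          let t := if 0 ≤ m then min k (PySem.Int.floordiv m c) else 0;
          if t < k then rem - t else pvLoopB (PySem.Dict.counter vals) cs (rem - t) (m - t * c)) = _
    rw [show pvBuckets vals (c :: cs)
          = List.replicate (vals.count c) c ++ pvBuckets vals cs from by
        simp [pvBuckets]]
    simp only [PySem.Dict.getD_counter]
    set K : Nat := vals.count c with hK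
    set t : Int := if 0 ≤ m then min (K : Int) (PySem.Int.floordiv m c) else 0 with htdef
    have hb := pvBucket c hc K (pvBuckets vals cs) m t htdef
    have htle : t ≤ (K : Int) := by
      rw [htdef]; split_ifs <;> omega
    by_cases hlt : t < (K : Int)
    · rw [if_pos hlt, hb, if_neg (by omega : ¬ t = (K : Int))]; ring
    · have heq : t = (K : Int) := by omega
      rw [if_neg hlt, ih (fun c' hc' => h c' (List.mem_cons_of_mem _ hc')), hb, if_pos heq]
      ring

lemma pvSumIte (cs : List Int) (h : cs.Nodup) (f : Int → Nat) (x : Int) :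
    (cs.map (fun c => if c = x then f c else 0)).sum = if x ∈ cs then f x else 0 := by
  induction cs with
  | nil => simp
  | cons a tl ih =>
    rw [List.nodup_cons] at h
    obtain ⟨ha, htl⟩ := h
    rw [List.map_cons, List.sum_cons, ih htl]
    by_cases hax : a = x
    · subst hax
      simp [ha]
    · rw [if_neg hax]
      by_cases hx : x ∈ tl
      · rw [if_pos hx, if_pos (List.mem_cons_of_mem _ hx)]
        omega
      · rw [if_neg hx, if_neg (fun hmem => by
          rcases List.mem_cons.mp hmem with h1 | h2
          · exact hax h1.symm
          · exact hx h2)]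

lemma pvValsMem (ids : List Int) (v : Int) (hv : v ∈ (PySem.Dict.counter ids).values) :
    1 ≤ v ∧ v ≤ (ids.length : Int) := by
  simp only [PySem.Dict.values, PySem.Dict.items_counter, List.map_map] at hv
  obtain ⟨key, hkey, rfl⟩ := List.mem_map.mp hv
  have hmem : key ∈ ids := (PySem.Set.mem_ofList ids key).mp hkey
  have h1 : 0 < ids.count key := List.count_pos_iff.mpr hmem
  have h2 : ids.count key ≤ ids.length := List.count_le_length
  constructor <;> simp <;> omega

lemma pvBuckets_perm (ids : List Int) :
    (pvBuckets (PySem.Dict.counter ids).values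
      (PySem.List.pyRange 1 ((ids.length : Int) + 1) 1)).Perm (PySem.Dict.counter ids).values := by
  set vals := (PySem.Dict.counter ids).values with hvals
  refine (List.perm_iff_count).mpr fun x => ?_
  have hcount : (pvBuckets vals (PySem.List.pyRange 1 ((ids.length : Int) + 1) 1)).count x
      = if x ∈ PySem.List.pyRange 1 ((ids.length : Int) + 1) 1 then vals.count x else 0 := by
    rw [pvBuckets, List.count_flatten, List.map_map]
    have hmap : (List.count x ∘ fun c => List.replicate (vals.count c) c)
        = fun c => if c = x then vals.count c else 0 := by
      funext c
      simp [List.count_replicate]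
    rw [hmap, pvSumIte _ (PySem.List.nodup_pyRange_one _ _)]
  rw [hcount]
  by_cases hx : x ∈ PySem.List.pyRange 1 ((ids.length : Int) + 1) 1
  · rw [if_pos hx]
  · rw [if_neg hx]
    rw [PySem.List.mem_pyRange_one] at hx
    refine (List.count_eq_zero.mpr fun hmem => hx ?_).symm
    have := pvValsMem ids x hmem
    omega

lemma pvBuckets_pairwise (vals : List Int) (cs : List Int) (h : cs.Pairwise (· < ·)) :
    (pvBuckets vals cs).Pairwise (· ≤ ·) := by
  rw [pvBuckets, List.pairwise_flatten]
  constructor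
  · intro l hl
    obtain ⟨c, _, rfl⟩ := List.mem_map.mp hl
    exact List.pairwise_replicate.mpr (Or.inr le_rfl)
  · rw [List.pairwise_map]
    refine h.imp fun {a b} hab => ?_
    intro x hx y hy
    rw [List.eq_of_mem_replicate hx, List.eq_of_mem_replicate hy]
    omega

lemma pvSortedEq (ids : List Int) :
    (PySem.List.sorted (PySem.Dict.counter ids).items (fun x => x.2) false).map (fun x => x.2)
      = pvBuckets (PySem.Dict.counter ids).values
          (PySem.List.pyRange 1 ((ids.length : Int) + 1) 1) := by
  have hperm : ((PySem.List.sorted (PySem.Dict.counter ids).items (fun x => x.2) false).map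
      (fun x => x.2)).Perm (pvBuckets (PySem.Dict.counter ids).values
        (PySem.List.pyRange 1 ((ids.length : Int) + 1) 1)) := by
    refine ((PySem.List.sorted_perm (PySem.Dict.counter ids).items (fun x => x.2) false).map
      (fun x => x.2)).trans ?_
    exact (pvBuckets_perm ids).symm
  exact List.Perm.eq_of_pairwise (fun a b _ _ h1 h2 => le_antisymm h1 h2)
    (PySem.List.sorted_map_key_pairwise _ _)
    (pvBuckets_pairwise _ _ (PySem.List.pairwise_lt_pyRange_one _ _)) hperm

-- ===== VERDICT (by name: the statement is the Claim_ definition above) =====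
theorem deleteProducts_spec : Claim_equal_deleteProducts := by
  intro ids m _
  unfold Spec_deleteProducts
  simp only [deleteProducts, deleteProducts_alt]
  have hstep : (fun (d : PySem.Dict Int Int) item =>
      if d.contains item then d.insert item (d.getD item 0 + 1) else d.insert item 1)
      = fun d x => d.insert x (d.getD x 0 + 1) := by
    funext d x
    cases h : d.contains x with
    | true => simp
    | false => simp [PySem.Dict.getD_of_not_contains d 0 h]
  simp only [hstep, PySem.Dict.foldl_insert_getD_add_one_eq_counter]
  rw [pvLoopA_eq, pvSortedEq,
    pvLoopB_eq _ _ (fun c hcmem => (PySem.List.mem_pyRange_one.mp hcmem).1)]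
  simp [PySem.List.length_sorted, PySem.Dict.size]
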